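-- pv_equiv track=rewrite | github.com/Krapanuk/AdventOfCode2023 | sumNumbersAndNumberstringsInStrings.py | checkIfDigitAfter
-- ===== SOURCE A (Python) =====
-- NumbersDigit = ["1", "2", "3", "4", "5", "6", "7", "8", "9"]
--
-- def checkIfDigitAfter(d):
-- 	highestDigit = -1
-- 	for numberDigit in NumbersDigit:
-- 		if numberDigit in d:
-- 			if highestDigit < 0:
-- 				highestDigit = d.rfind(numberDigit)
-- 			if d.rfind(numberDigit) > highestDigit:
-- 				highestDigit = d.rfind(numberDigit)
-- 	return highestDigit
-- ===== SOURCE B (Python) =====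
-- def checkIfDigitAfter(d):
--     for i in range(len(d) - 1, -1, -1):
--         if '1' <= d[i] <= '9':
--             return i
--     return -1
-- ===== Notes on version B (the rewrite author's own statement) =====
-- stated objective: simpler
-- what changed: Replaced nine full rfind scans over the digit-string list plus a running maximum with a single reverse pass over the string that returns the first index holding a nonzero decimal digit character (or -1).
import Mathlib
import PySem

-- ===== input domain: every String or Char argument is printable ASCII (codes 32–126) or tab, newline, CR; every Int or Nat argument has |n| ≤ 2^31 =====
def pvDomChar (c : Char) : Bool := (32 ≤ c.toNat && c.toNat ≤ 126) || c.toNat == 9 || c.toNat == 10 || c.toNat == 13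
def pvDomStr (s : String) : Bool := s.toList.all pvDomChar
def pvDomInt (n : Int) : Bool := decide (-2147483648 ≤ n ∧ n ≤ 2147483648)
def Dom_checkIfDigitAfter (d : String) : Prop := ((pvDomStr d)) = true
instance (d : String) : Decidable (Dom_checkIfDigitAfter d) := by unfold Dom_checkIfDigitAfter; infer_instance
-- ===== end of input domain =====

-- B replaces A's nine rfind scans + running maximum with one reverse pass returning the first '1'..'9' index (objective: simpler).

-- ===== PORT A =====
-- NumbersDigit = ["1", ..., "9"]  (module constant)
def pvNumbersDigit : List (List Char) := [['1'], ['2'], ['3'], ['4'], ['5'], ['6'], ['7'], ['8'], ['9']]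

-- for numberDigit in NumbersDigit: if numberDigit in d: (two branchy updates of highestDigit via d.rfind)
def checkIfDigitAfter (d : String) : Int :=
  pvNumbersDigit.foldl
    (fun highestDigit numberDigit =>
      if PySem.Chars.isIn numberDigit d.toList then
        let h1 := if highestDigit < 0 then PySem.Chars.rfind d.toList numberDigit else highestDigit
        if PySem.Chars.rfind d.toList numberDigit > h1 then PySem.Chars.rfind d.toList numberDigit
        else h1
      else highestDigit)
    (-1)

-- ===== PORT B =====
-- the loop 'for i in range(len(d)-1, -1, -1): if '1' <= d[i] <= '9': return i' as recursion over the reversed char list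
def pvAltGo (rev : List Char) (i : Int) : Int :=
  match rev with
  | [] => -1
  | c :: rest => if '1' ≤ c ∧ c ≤ '9' then i else pvAltGo rest (i - 1)

def checkIfDigitAfter_alt (d : String) : Int :=
  pvAltGo d.toList.reverse ((d.toList.length : Int) - 1)

-- ===== PRECONDITION & SPEC =====
def Spec_checkIfDigitAfter (d : String) (out : Int) : Prop := out = checkIfDigitAfter_alt d
instance (d : String) (out : Int) : Decidable (Spec_checkIfDigitAfter d out) := by unfold Spec_checkIfDigitAfter; infer_instance

-- ===== CLAIM (what is proved, stated in full; the proofs are below) =====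
def Claim_equal_checkIfDigitAfter : Prop := ∀ (d : String), Dom_checkIfDigitAfter d → Spec_checkIfDigitAfter d (checkIfDigitAfter d)

-- ===== LEMMAS AND PROOFS =====

theorem charEqIffToNat (a b : Char) : a = b ↔ a.toNat = b.toNat :=
  ⟨fun h => h ▸ rfl, fun h => Char.ext (UInt32.toNat_inj.mp h)⟩

theorem charLeIffToNat (a b : Char) : a ≤ b ↔ a.toNat ≤ b.toNat := by
  rw [Char.le_def, UInt32.le_iff_toNat_le]; exact Iff.rfl

-- the char-range test of B names exactly the digit chars A's list enumerates
theorem digitMemIff (a : Char) :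
    ('1' ≤ a ∧ a ≤ '9') ↔ a ∈ (['1','2','3','4','5','6','7','8','9'] : List Char) := by
  simp only [List.mem_cons, List.not_mem_nil, or_false, charEqIffToNat, charLeIffToNat,
    show ('1':Char).toNat = 49 from rfl, show ('2':Char).toNat = 50 from rfl,
    show ('3':Char).toNat = 51 from rfl, show ('4':Char).toNat = 52 from rfl,
    show ('5':Char).toNat = 53 from rfl, show ('6':Char).toNat = 54 from rfl,
    show ('7':Char).toNat = 55 from rfl, show ('8':Char).toNat = 56 from rfl,
    show ('9':Char).toNat = 57 from rfl]
  omega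

-- rfind.go on l ++ [a] agrees with rfind.go on l below l.length
theorem goAppend (l : List Char) (a c : Char) :
    ∀ j, j < l.length → PySem.Chars.rfind.go (l ++ [a]) [c] j = PySem.Chars.rfind.go l [c] j := by
  intro j
  induction j with
  | zero =>
    intro h
    rw [PySem.Chars.rfind.go, PySem.Chars.rfind.go]
    cases l with
    | nil => simp at h
    | cons x xs => simp [List.isPrefixOf]
  | succ j ih =>
    intro h
    rw [PySem.Chars.rfind.go, PySem.Chars.rfind.go]
    have hd : (l ++ [a]).drop (j+1) = l.drop (j+1) ++ [a] := List.drop_append_of_le_length (by omega)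
    rw [hd]
    have hne : l.drop (j+1) ≠ [] := by
      intro hnil
      have := List.length_drop (l := l) (i := j+1)
      rw [hnil] at this
      simp at this
      omega
    obtain ⟨x, xs, hx⟩ := List.exists_cons_of_ne_nil hne
    rw [hx]
    simp only [List.cons_append, List.isPrefixOf]
    split <;> simp_all [ih (by omega)]

theorem go0 (s sub : List Char) :
    PySem.Chars.rfind.go s sub 0 = if sub.isPrefixOf s then 0 else -1 := by
  rw [PySem.Chars.rfind.go]

theorem goS (s sub : List Char) (j : Nat) :
    PySem.Chars.rfind.go s sub (j + 1) =
      if sub.isPrefixOf (s.drop (j + 1)) then ((j : Int) + 1) else PySem.Chars.rfind.go s sub j := by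
  rw [PySem.Chars.rfind.go]
  split <;> simp

theorem rfindNil (c : Char) : PySem.Chars.rfind [] [c] = -1 := by
  rw [PySem.Chars.rfind]
  simp only [List.length_nil, go0]
  simp [List.isPrefixOf]

theorem rfindSnoc (l : List Char) (a c : Char) :
    PySem.Chars.rfind (l ++ [a]) [c] = if c = a then (l.length : Int) else PySem.Chars.rfind l [c] := by
  rw [PySem.Chars.rfind]
  simp only [List.length_append, List.length_singleton]
  rw [goS]
  rw [show (l ++ [a]).drop (l.length + 1) = [] by
        apply List.drop_eq_nil_of_le; simp]
  simp only [show (([c] : List Char).isPrefixOf []) = false by simp [List.isPrefixOf],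
    Bool.false_eq_true, if_false]
  cases l with
  | nil =>
    rw [rfindNil]
    simp only [List.length_nil, List.nil_append, go0, Nat.cast_zero]
    simp only [show (([c] : List Char).isPrefixOf [a]) = (c == a) by simp [List.isPrefixOf]]
    by_cases hca : c = a <;> simp [hca]
  | cons x xs =>
    have hlen : (x :: xs).length = xs.length + 1 := rfl
    rw [hlen, goS]
    have hd2 : ((x :: xs) ++ [a]).drop (xs.length + 1) = [a] := by
      rw [List.drop_append_of_le_length (by simp)]
      simp [List.drop_length]
    rw [hd2]
    simp only [show (([c] : List Char).isPrefixOf [a]) = (c == a) by simp [List.isPrefixOf]]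
    rw [goAppend (x :: xs) a c xs.length (by simp)]
    rw [PySem.Chars.rfind, hlen, goS]
    rw [show ((x :: xs).drop (xs.length + 1)) = [] from List.drop_eq_nil_of_le (by simp)]
    simp only [show (([c] : List Char).isPrefixOf []) = false by simp [List.isPrefixOf]]
    by_cases hca : c = a <;> simp [hca]

-- bounds of rfind on a singleton pattern
theorem rfindBounds (l : List Char) (c : Char) :
    -1 ≤ PySem.Chars.rfind l [c] ∧ PySem.Chars.rfind l [c] < l.length := by
  induction l using List.reverseRecOn with
  | nil => rw [rfindNil]; simp
  | append_singleton l a ih =>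
    rw [rfindSnoc]
    simp only [List.length_append, List.length_singleton]
    split <;> push_cast <;> omega

-- rfind = -1 exactly when the char is absent
theorem rfindNegIff (l : List Char) (c : Char) :
    PySem.Chars.rfind l [c] = -1 ↔ c ∉ l := by
  induction l using List.reverseRecOn with
  | nil => rw [rfindNil]; simp
  | append_singleton l a ih =>
    rw [rfindSnoc]
    by_cases hca : c = a
    · subst hca; simp
    · simp [hca, ih]

theorem isInSingleton (l : List Char) (c : Char) :
    PySem.Chars.isIn [c] l = true ↔ c ∈ l := by
  rw [PySem.Chars.isIn_iff_infix]
  constructor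
  · intro h; exact h.mem (by simp)
  · intro h
    obtain ⟨s, t, hst⟩ := List.append_of_mem h
    exact ⟨s, t, by simp [hst]⟩

-- A's if-cascade body equals a plain max when the accumulator is ≥ -1
theorem stepEq (l : List Char) (h : Int) (c : Char) (hh : -1 ≤ h) :
    (if PySem.Chars.isIn [c] l then
        let h1 := if h < 0 then PySem.Chars.rfind l [c] else h
        if PySem.Chars.rfind l [c] > h1 then PySem.Chars.rfind l [c] else h1
      else h) = max h (PySem.Chars.rfind l [c]) := by
  have hb := rfindBounds l c
  by_cases hin : PySem.Chars.isIn [c] l = true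
  · have hpos : ¬ (PySem.Chars.rfind l [c] = -1) := by
      rw [rfindNegIff]; exact not_not_intro ((isInSingleton l c).mp hin)
    simp only [hin, if_true]
    split_ifs <;> omega
  · have : c ∉ l := by
      intro hc; exact hin ((isInSingleton l c).mpr hc)
    have : PySem.Chars.rfind l [c] = -1 := (rfindNegIff l c).mpr this
    simp only [Bool.not_eq_true] at hin
    simp [hin, this]
    omega

-- fold of A's body = fold of max, over any digit sublist
theorem foldStep (l : List Char) (ds : List (List Char)) (h : Int)
    (hds : ∀ x ∈ ds, ∃ c : Char, x = [c]) (hh : -1 ≤ h) :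
    ds.foldl (fun highestDigit numberDigit =>
      if PySem.Chars.isIn numberDigit l then
        let h1 := if highestDigit < 0 then PySem.Chars.rfind l numberDigit else highestDigit
        if PySem.Chars.rfind l numberDigit > h1 then PySem.Chars.rfind l numberDigit else h1
      else highestDigit) h
    = ds.foldl (fun h x => max h (PySem.Chars.rfind l x)) h := by
  induction ds generalizing h with
  | nil => rfl
  | cons x xs ih =>
    obtain ⟨c, rfl⟩ := hds x (by simp)
    simp only [List.foldl_cons]
    rw [stepEq l h c hh]
    exact ih _ (fun y hy => hds y (by simp [hy])) (le_trans hh (le_max_left _ _))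

-- fold-max bookkeeping
theorem foldMaxUB (g : List Char → Int) (ds : List (List Char)) (h m : Int)
    (hub : ∀ x ∈ ds, g x ≤ m) (hh : h ≤ m) :
    ds.foldl (fun h x => max h (g x)) h ≤ m := by
  induction ds generalizing h with
  | nil => exact hh
  | cons x xs ih =>
    exact ih _ (fun y hy => hub y (by simp [hy])) (max_le hh (hub x (by simp)))

theorem foldMaxInit (g : List Char → Int) (ds : List (List Char)) (h : Int) :
    h ≤ ds.foldl (fun h x => max h (g x)) h := by
  induction ds generalizing h with
  | nil => exact le_refl h
  | cons x xs ih => exact le_trans (le_max_left _ _) (ih (max h (g x)))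

theorem foldMaxMem (g : List Char → Int) (ds : List (List Char)) (h : Int) (x : List Char)
    (hx : x ∈ ds) : g x ≤ ds.foldl (fun h x => max h (g x)) h := by
  induction ds generalizing h with
  | nil => simp at hx
  | cons y ys ih =>
    rcases List.mem_cons.mp hx with rfl | hmem
    · exact le_trans (le_max_right _ _) (foldMaxInit g ys _)
    · exact ih _ hmem

-- congruence: fold of max only depends on g on members
theorem foldMaxCongr (g g' : List Char → Int) (ds : List (List Char)) (h : Int)
    (hgg : ∀ x ∈ ds, g x = g' x) :
    ds.foldl (fun h x => max h (g x)) h = ds.foldl (fun h x => max h (g' x)) h := by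
  induction ds generalizing h with
  | nil => rfl
  | cons x xs ih =>
    simp only [List.foldl_cons, hgg x (by simp)]
    exact ih _ (fun y hy => hgg y (by simp [hy]))

-- the core equivalence, on char lists, by induction from the right
theorem coreEq (l : List Char) :
    pvNumbersDigit.foldl (fun highestDigit numberDigit =>
      if PySem.Chars.isIn numberDigit l then
        let h1 := if highestDigit < 0 then PySem.Chars.rfind l numberDigit else highestDigit
        if PySem.Chars.rfind l numberDigit > h1 then PySem.Chars.rfind l numberDigit else h1
      else highestDigit) (-1)
    = pvAltGo l.reverse ((l.length : Int) - 1) := by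
  have hds : ∀ x ∈ pvNumbersDigit, ∃ c : Char, x = [c] := by
    intro x hx
    simp only [pvNumbersDigit, List.mem_cons, List.not_mem_nil, or_false] at hx
    rcases hx with rfl|rfl|rfl|rfl|rfl|rfl|rfl|rfl|rfl <;> exact ⟨_, rfl⟩
  rw [foldStep l pvNumbersDigit (-1) hds (le_refl _)]
  induction l using List.reverseRecOn with
  | nil => decide
  | append_singleton l a ih =>
    have hsn : ∀ c : Char, PySem.Chars.rfind (l ++ [a]) [c] =
        if c = a then (l.length : Int) else PySem.Chars.rfind l [c] := fun c => rfindSnoc l a c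
    have hrev : (l ++ [a]).reverse = a :: l.reverse := by simp
    have hlen : ((l ++ [a]).length : Int) - 1 = (l.length : Int) := by simp
    rw [hrev]
    by_cases hdig : '1' ≤ a ∧ a ≤ '9'
    · -- a is a digit: A's max-fold is exactly l.length, B returns the index immediately
      have hmem : [a] ∈ pvNumbersDigit := by
        have := (digitMemIff a).mp hdig
        simp only [List.mem_cons, List.not_mem_nil, or_false] at this
        simp only [pvNumbersDigit, List.mem_cons, List.not_mem_nil, or_false]
        rcases this with rfl|rfl|rfl|rfl|rfl|rfl|rfl|rfl|rfl <;> simp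
      have hub : ∀ x ∈ pvNumbersDigit, PySem.Chars.rfind (l ++ [a]) x ≤ (l.length : Int) := by
        intro x hx
        obtain ⟨c, rfl⟩ := hds x hx
        rw [hsn c]
        have := rfindBounds l c
        split <;> omega
      have h1 : pvNumbersDigit.foldl (fun h x => max h (PySem.Chars.rfind (l ++ [a]) x)) (-1)
          ≤ (l.length : Int) := foldMaxUB _ _ _ _ hub (by omega)
      have h2 : (l.length : Int) ≤
          pvNumbersDigit.foldl (fun h x => max h (PySem.Chars.rfind (l ++ [a]) x)) (-1) := by
        have := foldMaxMem (fun x => PySem.Chars.rfind (l ++ [a]) x) pvNumbersDigit (-1) [a] hmem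
        simpa [hsn a] using this
      rw [pvAltGo, if_pos hdig, hlen]
      omega
    · -- a is not a digit: both sides reduce to the l case
      have hcong : ∀ x ∈ pvNumbersDigit, PySem.Chars.rfind (l ++ [a]) x = PySem.Chars.rfind l x := by
        intro x hx
        obtain ⟨c, rfl⟩ := hds x hx
        rw [hsn c, if_neg]
        intro hca
        exact hdig ((digitMemIff a).mpr (by
          have := (digitMemIff c).2
          subst hca
          have h9 : c ∈ (['1','2','3','4','5','6','7','8','9'] : List Char) := by
            simp only [pvNumbersDigit, List.mem_cons, List.not_mem_nil, or_false] at hx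
            rcases hx with h|h|h|h|h|h|h|h|h <;> simp [List.cons.injEq] at h <;> simp [h]
          exact h9))
      rw [foldMaxCongr _ _ _ _ hcong, ih]
      rw [pvAltGo, if_neg hdig]
      congr 1
      simp

theorem mainEq (d : String) : checkIfDigitAfter d = checkIfDigitAfter_alt d := by
  rw [checkIfDigitAfter, checkIfDigitAfter_alt]
  exact coreEq d.toList

-- ===== VERDICT (by name: the statement is the Claim_ definition above) =====
theorem checkIfDigitAfter_spec : Claim_equal_checkIfDigitAfter := by
  intro d _
  exact mainEq d
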